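-- pv_equiv track=rewrite | github.com/resecmo/fastq-kmers | main.py | spectrum_from_sequences
-- ===== SOURCE A (Python) =====
-- from typing import List, Tuple, NoReturn, Iterable
--
-- def spectrum_from_sequences(seqs: Iterable[str], k: int) -> List[Tuple[str, int]]:
--     spectrum = {}
--     for sequence in seqs:
--         for i in range(len(sequence) - k + 1):
--             if sequence[i:i+k] in spectrum:
--                 spectrum[sequence[i:i+k]] += 1
--             else:
--                 spectrum[sequence[i:i+k]] = 1
--     return sorted(spectrum.items(), key=lambda x: x[1], reverse=True)  # sorted by frequency
-- ===== SOURCE B (Python) =====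
-- def spectrum_from_sequences(seqs, k):
--     spectrum = {}
--     for sequence in seqs:
--         for i in range(len(sequence) - k + 1):
--             kmer = sequence[i:i+k]
--             spectrum[kmer] = spectrum.get(kmer, 0) + 1
--     if not spectrum:
--         return []
--     maxc = max(spectrum.values())
--     result = []
--     for c in range(maxc, 0, -1):
--         result.extend(item for item in spectrum.items() if item[1] == c)
--     return result
-- ===== Notes on version B (the rewrite author's own statement) =====
-- stated objective: alternative
-- what changed: Replaces the comparison sort of the k-mer counts by direct selection: after counting (same loop), B walks the counts from max(counts) down to 1 and emits, for each count value, the dict items with that count in insertion order — no sorted() call.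
import Mathlib
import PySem

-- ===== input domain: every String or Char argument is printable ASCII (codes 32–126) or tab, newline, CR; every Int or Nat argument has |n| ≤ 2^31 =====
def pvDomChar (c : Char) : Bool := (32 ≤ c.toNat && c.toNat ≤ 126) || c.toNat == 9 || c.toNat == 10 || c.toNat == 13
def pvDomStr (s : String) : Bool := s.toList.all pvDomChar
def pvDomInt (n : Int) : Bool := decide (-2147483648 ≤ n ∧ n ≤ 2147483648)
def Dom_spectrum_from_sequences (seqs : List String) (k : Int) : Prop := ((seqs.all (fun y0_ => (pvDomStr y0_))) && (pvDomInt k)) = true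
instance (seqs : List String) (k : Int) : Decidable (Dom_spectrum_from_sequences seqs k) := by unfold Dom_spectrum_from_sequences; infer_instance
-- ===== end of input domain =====

-- B replaces A's sorted() by direct selection: walk the count values from the maximum down
-- to 1 and emit each dict item whose count equals the current value (alternative algorithm,
-- same counting loop; equal output including tie order, proved below).

-- ===== PORT A =====
def spectrum_from_sequences (seqs : List String) (k : Int) : List (String × Int) :=
  let spectrum : PySem.Dict String Int :=
    seqs.foldl (fun d sequence =>
      (PySem.List.pyRange 0 (PySem.Str.len sequence - k + 1) 1).foldl (fun d i =>
        if d.contains (PySem.Str.slice sequence (some i) (some (i + k))) then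
          d.insert (PySem.Str.slice sequence (some i) (some (i + k)))
                   (d.getD (PySem.Str.slice sequence (some i) (some (i + k))) 0 + 1)
        else
          d.insert (PySem.Str.slice sequence (some i) (some (i + k))) 1) d)
      PySem.Dict.empty
  PySem.List.sorted spectrum.items (fun x => x.2) true

-- ===== PORT B =====
def spectrum_from_sequences_alt (seqs : List String) (k : Int) : List (String × Int) :=
  let spectrum : PySem.Dict String Int :=
    seqs.foldl (fun d sequence =>
      (PySem.List.pyRange 0 (PySem.Str.len sequence - k + 1) 1).foldl (fun d i =>
        let kmer := PySem.Str.slice sequence (some i) (some (i + k))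
        d.insert kmer (d.getD kmer 0 + 1)) d)
      PySem.Dict.empty
  match PySem.List.max? spectrum.values (fun v => v) with
  | none => []
  | some maxc =>
      (PySem.List.pyRange maxc 0 (-1)).foldl
        (fun result c => result ++ spectrum.items.filter (fun item => item.2 == c)) []

-- ===== PRECONDITION & SPEC =====
def Spec_spectrum_from_sequences (seqs : List String) (k : Int) (out : List (String × Int)) : Prop := out = spectrum_from_sequences_alt seqs k
instance (seqs : List String) (k : Int) (out : List (String × Int)) : Decidable (Spec_spectrum_from_sequences seqs k out) := by unfold Spec_spectrum_from_sequences; infer_instance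

-- ===== CLAIM (what is proved, stated in full; the proofs are below) =====
def Claim_equal_spectrum_from_sequences : Prop := ∀ (seqs : List String) (k : Int), Dom_spectrum_from_sequences seqs k → Spec_spectrum_from_sequences seqs k (spectrum_from_sequences seqs k)

-- ===== LEMMAS AND PROOFS =====

theorem dicts_eq (seqs : List String) (k : Int) :
    (seqs.foldl (fun d sequence =>
      (PySem.List.pyRange 0 (PySem.Str.len sequence - k + 1) 1).foldl (fun d i =>
        if d.contains (PySem.Str.slice sequence (some i) (some (i + k))) then
          d.insert (PySem.Str.slice sequence (some i) (some (i + k)))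
                   (d.getD (PySem.Str.slice sequence (some i) (some (i + k))) 0 + 1)
        else
          d.insert (PySem.Str.slice sequence (some i) (some (i + k))) 1) d)
      (PySem.Dict.empty : PySem.Dict String Int)) =
    (seqs.foldl (fun d sequence =>
      (PySem.List.pyRange 0 (PySem.Str.len sequence - k + 1) 1).foldl (fun d i =>
        let kmer := PySem.Str.slice sequence (some i) (some (i + k))
        d.insert kmer (d.getD kmer 0 + 1)) d)
      PySem.Dict.empty) := by
  have hstep : ∀ (d : PySem.Dict String Int) (kmer : String),
      (if d.contains kmer then d.insert kmer (d.getD kmer 0 + 1) else d.insert kmer 1) =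
      d.insert kmer (d.getD kmer 0 + 1) := by
    intro d kmer
    by_cases h : d.contains kmer = true
    · simp [h]
    · simp only [Bool.not_eq_true] at h
      rw [PySem.Dict.getD_of_not_contains d 0 h, h]
      norm_num
  congr 1
  funext d sequence
  congr 1
  funext d i
  exact hstep d (PySem.Str.slice sequence (some i) (some (i + k)))

theorem insertBy_all_before {α : Type} (before : α → α → Bool) (x : α) (l : List α)
    (h : ∀ y ∈ l, before x y = true) :
    PySem.List.insertBy before x l = x :: l := by
  cases l with
  | nil => rfl
  | cons y ys => simp [PySem.List.insertBy, h y (by simp)]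

theorem insertBy_append_not {α : Type} (before : α → α → Bool) (x : α) (as bs : List α)
    (h : ∀ y ∈ as, before x y = false) :
    PySem.List.insertBy before x (as ++ bs) = as ++ PySem.List.insertBy before x bs := by
  induction as with
  | nil => simp
  | cons a as ih =>
      simp only [List.cons_append, PySem.List.insertBy, h a (by simp)]
      simp only [Bool.false_eq_true, if_false]
      rw [ih (fun y hy => h y (by simp [hy]))]

theorem insertBy_flatMap (key : (String × Int) → Int) (x : String × Int)
    (cs : List Int) (p : List (String × Int))
    (hs : cs.Pairwise (· > ·)) (hx : key x ∈ cs) :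
    PySem.List.insertBy (fun a b => decide (key b < key a)) x
        (cs.flatMap (fun c => p.filter (fun y => key y == c))) =
    cs.flatMap (fun c => (p ++ [x]).filter (fun y => key y == c)) := by
  induction cs with
  | nil => simp at hx
  | cons c cs' ih =>
      rw [List.pairwise_cons] at hs
      obtain ⟨hlt, hs'⟩ := hs
      have hseg : ∀ y ∈ p.filter (fun y => key y == c), key y = c := by
        intro y hy
        have := List.of_mem_filter hy
        simpa using this
      by_cases hc : key x = c
      · -- x belongs to the first bucket: skip it, then insert at the head of the rest
        have hnot : ∀ y ∈ p.filter (fun y => key y == c),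
            (fun a b => decide (key b < key a)) x y = false := by
          intro y hy
          simp [hseg y hy, hc]
        have hall : ∀ y ∈ cs'.flatMap (fun c => p.filter (fun y => key y == c)),
            (fun a b => decide (key b < key a)) x y = true := by
          intro y hy
          rw [List.mem_flatMap] at hy
          obtain ⟨c', hc', hy'⟩ := hy
          have h1 : key y = c' := by simpa using List.of_mem_filter hy'
          have h2 : c' < c := hlt c' hc'
          simp [h1, hc]; omega
        rw [List.flatMap_cons, insertBy_append_not _ _ _ _ hnot,
            insertBy_all_before _ _ _ hall, List.flatMap_cons]
        have hfirst : (p ++ [x]).filter (fun y => key y == c) =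
            p.filter (fun y => key y == c) ++ [x] := by
          simp [List.filter_append, hc]
        have hrest : cs'.flatMap (fun c => (p ++ [x]).filter (fun y => key y == c)) =
            cs'.flatMap (fun c => p.filter (fun y => key y == c)) := by
          apply List.flatMap_congr
          intro c' hc'
          have : key x ≠ c' := by have := hlt c' hc'; omega
          simp [List.filter_append, this]
        rw [hfirst, hrest]
        simp
      · -- x belongs to a later bucket
        have hx' : key x ∈ cs' := by
          cases hx with
          | head => exact absurd rfl hc
          | tail _ h => exact h
        have hnot : ∀ y ∈ p.filter (fun y => key y == c),
            (fun a b => decide (key b < key a)) x y = false := by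
          intro y hy
          have h1 : key y = c := hseg y hy
          have h2 : key x < c := hlt _ hx'
          simp [h1]; omega
        rw [List.flatMap_cons, insertBy_append_not _ _ _ _ hnot, ih hs' hx',
            List.flatMap_cons]
        have : (p ++ [x]).filter (fun y => key y == c) = p.filter (fun y => key y == c) := by
          simp [List.filter_append, hc]
        rw [this]

theorem sorted_rev_eq_flatMap_filter (key : (String × Int) → Int)
    (cs : List Int) (xs : List (String × Int))
    (hs : cs.Pairwise (· > ·)) (hm : ∀ x ∈ xs, key x ∈ cs) :
    PySem.List.sorted xs key true = cs.flatMap (fun c => xs.filter (fun y => key y == c)) := by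
  rw [PySem.List.sorted_rev_eq_foldl_insertBy]
  induction xs using List.reverseRecOn with
  | nil => simp
  | append_singleton p x ih =>
      rw [List.foldl_append, List.foldl_cons, List.foldl_nil]
      rw [ih (fun y hy => hm y (by simp [hy]))]
      exact insertBy_flatMap key x cs p hs (hm x (by simp))

-- the dict both ports build (equal to A's dict by dicts_eq); proof-only helper
def dB (seqs : List String) (k : Int) : PySem.Dict String Int :=
  seqs.foldl (fun d sequence =>
    (PySem.List.pyRange 0 (PySem.Str.len sequence - k + 1) 1).foldl (fun d i =>
      let kmer := PySem.Str.slice sequence (some i) (some (i + k))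
      d.insert kmer (d.getD kmer 0 + 1)) d)
    PySem.Dict.empty

theorem A_eq (seqs : List String) (k : Int) :
    spectrum_from_sequences seqs k =
      PySem.List.sorted (dB seqs k).items (fun x => x.2) true := by
  unfold spectrum_from_sequences
  exact congrArg (fun d : PySem.Dict String Int =>
    PySem.List.sorted d.items (fun x => x.2) true) (dicts_eq seqs k)

theorem B_eq (seqs : List String) (k : Int) :
    spectrum_from_sequences_alt seqs k =
      match PySem.List.max? (dB seqs k).values (fun v => v) with
      | none => []
      | some maxc =>
          (PySem.List.pyRange maxc 0 (-1)).foldl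
            (fun result c => result ++ (dB seqs k).items.filter (fun item => item.2 == c)) [] := rfl

theorem foldl_inv {β : Type} (P : PySem.Dict String Int → Prop)
    (f : PySem.Dict String Int → β → PySem.Dict String Int)
    (h : ∀ d x, P d → P (f d x)) :
    ∀ (l : List β) (d : PySem.Dict String Int), P d → P (l.foldl f d) := by
  intro l
  induction l with
  | nil => intro d hd; exact hd
  | cons x xs ih => intro d hd; exact ih _ (h d x hd)

theorem dB_inv (seqs : List String) (k : Int) :
    (dB seqs k).keys.Nodup ∧ ∀ v ∈ (dB seqs k).values, 1 ≤ v := by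
  have hins : ∀ (d : PySem.Dict String Int) (kmer : String),
      (d.keys.Nodup ∧ ∀ v ∈ d.values, 1 ≤ v) →
      ((d.insert kmer (d.getD kmer 0 + 1)).keys.Nodup ∧
        ∀ v ∈ (d.insert kmer (d.getD kmer 0 + 1)).values, 1 ≤ v) := by
    intro d kmer ⟨hnd, hpos⟩
    refine ⟨PySem.Dict.nodup_keys_insert d kmer _ hnd, ?_⟩
    intro v hv
    rcases PySem.Dict.mem_values_insert d kmer _ v hv with h | h
    · subst h
      rw [PySem.Dict.getD_eq_get?_getD]
      cases hq : d.get? kmer with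
      | none => simp
      | some w =>
          have hw : w ∈ d.values := by
            simp only [PySem.Dict.values]
            exact List.mem_map.mpr ⟨(kmer, w), PySem.Dict.mem_items_of_get?_eq_some d hq, rfl⟩
          have := hpos w hw
          simp only [Option.getD_some]
          omega
    · exact hpos v h
  refine foldl_inv (fun d => d.keys.Nodup ∧ ∀ v ∈ d.values, 1 ≤ v) _ ?_ seqs
    PySem.Dict.empty ⟨by simp [PySem.Dict.empty, PySem.Dict.keys], by simp [PySem.Dict.empty, PySem.Dict.values]⟩
  intro d sequence hd
  exact foldl_inv (fun d => d.keys.Nodup ∧ ∀ v ∈ d.values, 1 ≤ v) _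
    (fun d i hd => hins d _ hd) _ d hd

-- ===== VERDICT (by name: the statement is the Claim_ definition above) =====
theorem spectrum_from_sequences_spec : Claim_equal_spectrum_from_sequences := by
  intro seqs k _
  unfold Spec_spectrum_from_sequences
  rw [A_eq, B_eq]
  obtain ⟨hnd, hpos⟩ := dB_inv seqs k
  cases hmax : PySem.List.max? (dB seqs k).values (fun v => v) with
  | none =>
      rw [PySem.List.max?_eq_none_iff] at hmax
      have hitems : (dB seqs k).items = [] := by
        have := hmax
        simp only [PySem.Dict.values] at this
        exact List.map_eq_nil_iff.mp this
      simp [hitems, PySem.List.sorted]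
  | some m =>
      show PySem.List.sorted (dB seqs k).items (fun x => x.2) true =
        (PySem.List.pyRange m 0 (-1)).foldl
          (fun result c => result ++ (dB seqs k).items.filter (fun item => item.2 == c)) []
      rw [PySem.List.foldl_append_eq_flatMap, List.nil_append]
      apply sorted_rev_eq_flatMap_filter (fun x => x.2)
      · rw [PySem.List.pyRange_neg_one]
        refine List.pairwise_map.mpr (List.pairwise_lt_range.imp ?_)
        intro a b hab
        simp only [gt_iff_lt]
        omega
      · intro x hx
        rw [PySem.List.mem_pyRange_neg_one]
        have hv : x.2 ∈ (dB seqs k).values := by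
          simp only [PySem.Dict.values]
          exact List.mem_map.mpr ⟨x, hx, rfl⟩
        exact ⟨hpos x.2 hv, PySem.List.max?_isMax hmax x.2 hv⟩
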